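-- pv_equiv track=rewrite | github.com/Ahmed5M5Mohamed/Practical-Theory_of_Computation- | Task2.py | check_an_bn
-- ===== SOURCE A (Python) =====
-- def check_an_bn(word):
--     memory = []
--
--     stage = "a"
--
--     for letter in word:
--         if letter == "a" and stage == "a":
--             memory.append("a")
--         elif letter == "b":
--             if not memory:
--                 return False
--             memory.pop()
--             stage = "b"
--         else:
--             return False
--
--     return not memory
-- ===== SOURCE B (Python) =====
-- def check_an_bn(word):
--     n = len(word)
--     if n % 2:
--         return False
--     half = n // 2
--     return all(c == "a" for c in word[:half]) and all(c == "b" for c in word[half:])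
-- ===== Notes on version B (the rewrite author's own statement) =====
-- stated objective: simpler
-- what changed: Replaces the stack-and-stage single pass with a closed-form structural check: even length, first half all 'a', second half all 'b'.
import Mathlib
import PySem

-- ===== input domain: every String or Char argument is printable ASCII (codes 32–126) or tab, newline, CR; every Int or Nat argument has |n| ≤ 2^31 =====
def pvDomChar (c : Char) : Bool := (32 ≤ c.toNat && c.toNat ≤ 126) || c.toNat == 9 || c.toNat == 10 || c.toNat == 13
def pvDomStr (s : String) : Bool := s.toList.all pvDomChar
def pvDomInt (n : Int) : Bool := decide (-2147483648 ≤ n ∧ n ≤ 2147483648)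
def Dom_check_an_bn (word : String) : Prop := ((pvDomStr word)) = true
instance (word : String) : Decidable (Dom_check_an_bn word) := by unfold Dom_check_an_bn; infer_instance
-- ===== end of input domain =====

-- B replaces A's stack-and-stage single pass by a closed-form structural check (even length,
-- first half all 'a', second half all 'b'); objective: simpler.

-- ===== PORT A =====
-- the for-loop with early return, state = (memory, stage); structural recursion over the chars
def check_an_bn_loop : List Char → List String → String → Bool
  | [], memory, _stage => memory.isEmpty
  | letter :: rest, memory, stage =>
    if letter == 'a' && stage == "a" then
      check_an_bn_loop rest ("a" :: memory) stage
    else if letter == 'b' then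
      if memory.isEmpty then false
      else check_an_bn_loop rest memory.tail "b"
    else false

def check_an_bn (word : String) : Bool :=
  check_an_bn_loop word.toList [] "a"

-- ===== PORT B =====
-- word[:half] / word[half:] with 0 ≤ half ≤ len(word) are exactly take/drop
def check_an_bn_alt (word : String) : Bool :=
  let cs := word.toList
  let n := cs.length
  if n % 2 ≠ 0 then false
  else
    let half := n / 2
    (cs.take half).all (fun c => c == 'a') && (cs.drop half).all (fun c => c == 'b')

-- ===== PRECONDITION & SPEC =====
def Spec_check_an_bn (word : String) (out : Bool) : Prop := out = check_an_bn_alt word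
instance (word : String) (out : Bool) : Decidable (Spec_check_an_bn word out) := by unfold Spec_check_an_bn; infer_instance

-- ===== CLAIM (what is proved, stated in full; the proofs are below) =====
def Claim_equal_check_an_bn : Prop := ∀ (word : String), Dom_check_an_bn word → Spec_check_an_bn word (check_an_bn word)

-- ===== LEMMAS AND PROOFS =====

-- In stage "b" the loop accepts exactly a run of |memory| many 'b's.
lemma loop_stageB : ∀ (cs : List Char) (m : List String),
    check_an_bn_loop cs m "b" = true ↔ cs = List.replicate m.length 'b' := by
  intro cs
  induction cs with
  | nil =>
    intro m
    simp only [check_an_bn_loop, List.isEmpty_iff]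
    constructor
    · intro h; simp [h]
    · intro h
      cases m with
      | nil => rfl
      | cons s ms => simp [List.replicate_succ] at h
  | cons c rest ih =>
    intro m
    by_cases hc : c = 'b'
    · subst hc
      cases m with
      | nil =>
        rw [show check_an_bn_loop ('b' :: rest) [] "b" = false from rfl]
        constructor
        · intro h; simp at h
        · intro h; simp at h
      | cons s ms =>
        rw [show check_an_bn_loop ('b' :: rest) (s :: ms) "b"
              = check_an_bn_loop rest ms "b" from rfl]
        rw [ih ms]
        simp [List.replicate_succ]
    · have hstep : check_an_bn_loop (c :: rest) m "b" = false := by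
        simp only [check_an_bn_loop]
        rw [if_neg (by simp), if_neg (by simp [hc])]
      rw [hstep]
      constructor
      · intro h; simp at h
      · intro h
        exfalso
        cases hm : m.length with
        | zero => rw [hm] at h; simp at h
        | succ j =>
          rw [hm, List.replicate_succ] at h
          simp at h
          exact hc h.1

-- In stage "a" the loop accepts exactly a^k b^(k+|memory|).
lemma loop_stageA : ∀ (cs : List Char) (m : List String),
    check_an_bn_loop cs m "a" = true ↔
      ∃ k, cs = List.replicate k 'a' ++ List.replicate (k + m.length) 'b' := by
  intro cs
  induction cs with
  | nil =>
    intro m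
    simp only [check_an_bn_loop, List.isEmpty_iff]
    constructor
    · intro h; exact ⟨0, by simp [h]⟩
    · rintro ⟨k, hk⟩
      have hl := congrArg List.length hk
      simp at hl
      rw [← List.length_eq_zero_iff]
      omega
  | cons c rest ih =>
    intro m
    by_cases ha : c = 'a'
    · subst ha
      rw [show check_an_bn_loop ('a' :: rest) m "a"
            = check_an_bn_loop rest ("a" :: m) "a" from rfl]
      rw [ih ("a" :: m)]
      constructor
      · rintro ⟨k, hk⟩
        have hc2 : k + ("a" :: m).length = k + 1 + m.length := by
          simp [List.length_cons]; omega
        refine ⟨k + 1, ?_⟩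
        rw [hk, hc2, List.replicate_succ, List.cons_append]
      · rintro ⟨k, hk⟩
        cases k with
        | zero =>
          exfalso
          cases hm : m.length with
          | zero => rw [hm] at hk; simp at hk
          | succ j =>
            rw [hm] at hk
            simp [List.replicate_succ] at hk
        | succ j =>
          rw [List.replicate_succ, List.cons_append] at hk
          simp only [List.cons.injEq, true_and] at hk
          have hc2 : j + ("a" :: m).length = j + 1 + m.length := by
            simp [List.length_cons]; omega
          exact ⟨j, by rw [hc2]; exact hk⟩
    · by_cases hb : c = 'b'
      · subst hb
        cases m with
        | nil =>
          rw [show check_an_bn_loop ('b' :: rest) [] "a" = false from rfl]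
          constructor
          · intro h; simp at h
          · rintro ⟨k, hk⟩
            exfalso
            cases k with
            | zero => simp at hk
            | succ j =>
              rw [List.replicate_succ, List.cons_append] at hk
              simp at hk
        | cons s ms =>
          rw [show check_an_bn_loop ('b' :: rest) (s :: ms) "a"
                = check_an_bn_loop rest ms "b" from rfl]
          rw [loop_stageB rest ms]
          constructor
          · intro h
            refine ⟨0, ?_⟩
            rw [h]
            simp [List.replicate_succ]
          · rintro ⟨k, hk⟩
            cases k with
            | zero =>
              simp only [List.length_cons, Nat.zero_add, List.replicate,
                List.nil_append, List.replicate_succ, List.cons.injEq, true_and] at hk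
              exact hk
            | succ j =>
              exfalso
              rw [List.replicate_succ, List.cons_append] at hk
              simp at hk
      · have hstep : check_an_bn_loop (c :: rest) m "a" = false := by
          simp only [check_an_bn_loop]
          rw [if_neg (by simp [ha]), if_neg (by simp [hb])]
        rw [hstep]
        constructor
        · intro h; simp at h
        · rintro ⟨k, hk⟩
          exfalso
          cases k with
          | zero =>
            cases hm : m.length with
            | zero => rw [hm] at hk; simp at hk
            | succ j =>
              rw [hm] at hk
              simp [List.replicate_succ] at hk
              exact hb hk.1
          | succ j =>
            rw [List.replicate_succ, List.cons_append] at hk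
            simp at hk
            exact ha hk.1

lemma A_iff (cs : List Char) :
    check_an_bn_loop cs [] "a" = true ↔
      ∃ k, cs = List.replicate k 'a' ++ List.replicate k 'b' := by
  simpa using loop_stageA cs []

lemma B_iff (cs : List Char) :
    ((if cs.length % 2 ≠ 0 then false
      else (cs.take (cs.length / 2)).all (fun c => c == 'a') &&
           (cs.drop (cs.length / 2)).all (fun c => c == 'b')) = true) ↔
      ∃ k, cs = List.replicate k 'a' ++ List.replicate k 'b' := by
  constructor
  · intro h
    split_ifs at h with hpar
    have hpar' : cs.length % 2 = 0 := by omega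
    rw [Bool.and_eq_true, List.all_eq_true, List.all_eq_true] at h
    obtain ⟨h1, h2⟩ := h
    refine ⟨cs.length / 2, ?_⟩
    have htake : cs.take (cs.length / 2) = List.replicate (cs.length / 2) 'a' := by
      rw [List.eq_replicate_iff]
      refine ⟨by rw [List.length_take]; omega, fun b hb => by simpa using h1 b hb⟩
    have hdrop : cs.drop (cs.length / 2) = List.replicate (cs.length / 2) 'b' := by
      rw [List.eq_replicate_iff]
      refine ⟨by rw [List.length_drop]; omega, fun b hb => by simpa using h2 b hb⟩
    conv_lhs => rw [← List.take_append_drop (cs.length / 2) cs]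
    rw [htake, hdrop]
  · rintro ⟨k, hk⟩
    subst hk
    have hlen : (List.replicate k 'a' ++ List.replicate k 'b').length = 2 * k := by
      simp [two_mul]
    rw [hlen, if_neg (by omega)]
    have hhalf : 2 * k / 2 = k := by omega
    rw [hhalf]
    have ht : (List.replicate k 'a' ++ List.replicate k 'b').take k
        = List.replicate k 'a' := by simp
    have hd : (List.replicate k 'a' ++ List.replicate k 'b').drop k
        = List.replicate k 'b' := by simp
    rw [ht, hd]
    simp

-- ===== VERDICT (by name: the statement is the Claim_ definition above) =====
theorem check_an_bn_spec : Claim_equal_check_an_bn := by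
  intro word _
  unfold Spec_check_an_bn check_an_bn check_an_bn_alt
  rw [Bool.eq_iff_iff, A_iff]
  exact (B_iff word.toList).symm
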